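-- pv_equiv track=rewrite | github.com/Peter200lx/advent-of-code | 2015/day05.py | is_good_str_p2
-- ===== SOURCE A (Python) =====
-- def is_good_str_p2(input: str) -> bool:
--     input_len = len(input)
--     found_mirror = False
--     pair_dict = {}
--     found_pair_match = False
--     for i in range(input_len):
--         if i + 1 < input_len:
--             pair = input[i : i + 2]
--             if pair in pair_dict and pair_dict[pair] + 1 < i:
--                 found_pair_match = True
--             if pair not in pair_dict:
--                 pair_dict[pair] = i
--         if i + 2 < input_len:
--             if input[i] == input[i + 2]:
--                 found_mirror = True
--     return found_pair_match and found_mirror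
-- ===== SOURCE B (Python) =====
-- def is_good_str_p2(input: str) -> bool:
--     n = len(input)
--     has_pair = any(input[i:i + 2] in input[i + 2:] for i in range(n - 1))
--     has_mirror = any(input[i] == input[i + 2] for i in range(n - 2))
--     return has_pair and has_mirror
-- ===== Notes on version B (the rewrite author's own statement) =====
-- stated objective: simpler
-- what changed: Replaces the single-pass loop with a first-index dict and three state flags by two independent any() scans: a substring search of each pair in the rest of the string (offset by 2 to enforce non-overlap) and a direct i/i+2 mirror check.
import Mathlib
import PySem

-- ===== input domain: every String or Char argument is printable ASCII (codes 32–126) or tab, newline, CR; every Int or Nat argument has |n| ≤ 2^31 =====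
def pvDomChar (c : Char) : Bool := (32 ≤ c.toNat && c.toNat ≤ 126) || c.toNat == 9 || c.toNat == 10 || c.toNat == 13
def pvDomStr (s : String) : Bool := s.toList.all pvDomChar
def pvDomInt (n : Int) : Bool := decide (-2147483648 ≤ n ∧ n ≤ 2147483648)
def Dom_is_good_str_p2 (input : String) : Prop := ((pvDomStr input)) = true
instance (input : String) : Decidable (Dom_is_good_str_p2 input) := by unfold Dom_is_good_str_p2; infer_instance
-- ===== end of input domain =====

-- B replaces A's single-pass dict-of-first-indices loop by two independent any() scans
-- (a substring search for a non-overlapping repeated pair and a direct i/i+2 mirror check).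


-- ===== PORT A =====
-- one iteration of A's loop body; state = (found_mirror, pair_dict, found_pair_match).
-- input[i]/input[i+2] are read with pyGetD: the guard i+2 < n keeps both indices exactly
-- where Python's input[i] returns, so the default character is never used.
def aStep (cs : List Char) (n : Nat)
    (st : Bool × PySem.Dict (List Char) Int × Bool) (i : Nat) :
    Bool × PySem.Dict (List Char) Int × Bool :=
  let fm := st.1
  let pd := st.2.1
  let fpm := st.2.2
  let pdfpm :=
    if i + 1 < n then
      let pair := PySem.List.slice cs (some (i : Int)) (some ((i : Int) + 2))
      let fpm' :=
        match pd.get? pair with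
        | some v => if v + 1 < (i : Int) then true else fpm
        | none => fpm
      let pd' := if (pd.get? pair).isNone then pd.insert pair (i : Int) else pd
      (pd', fpm')
    else (pd, fpm)
  let fm' :=
    if i + 2 < n then
      if PySem.List.pyGetD cs (i : Int) ' ' == PySem.List.pyGetD cs ((i : Int) + 2) ' '
      then true else fm
    else fm
  (fm', pdfpm.1, pdfpm.2)

def is_good_str_p2 (input : String) : Bool :=
  let cs := input.toList
  let n := cs.length
  let st := (List.range n).foldl (aStep cs n) (false, PySem.Dict.empty, false)
  st.2.2 && st.1

-- ===== PORT B =====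
def is_good_str_p2_alt (input : String) : Bool :=
  let cs := input.toList
  let n := cs.length
  let hasPair := (List.range (n - 1)).any (fun i =>
    PySem.Chars.isIn (PySem.List.slice cs (some (i : Int)) (some ((i : Int) + 2)))
      (PySem.List.slice cs (some ((i : Int) + 2)) none))
  let hasMirror := (List.range (n - 2)).any (fun i =>
    PySem.List.pyGetD cs (i : Int) ' ' == PySem.List.pyGetD cs ((i : Int) + 2) ' ')
  hasPair && hasMirror

-- ===== PRECONDITION & SPEC =====
def Spec_is_good_str_p2 (input : String) (out : Bool) : Prop := out = is_good_str_p2_alt input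
instance (input : String) (out : Bool) : Decidable (Spec_is_good_str_p2 input out) := by unfold Spec_is_good_str_p2; infer_instance

-- ===== CLAIM (what is proved, stated in full; the proofs are below) =====
def Claim_equal_is_good_str_p2 : Prop := ∀ (input : String), Dom_is_good_str_p2 input → Spec_is_good_str_p2 input (is_good_str_p2 input)

-- ===== LEMMAS AND PROOFS =====

-- the 2-char window of cs starting at i
def pairAt (cs : List Char) (i : Nat) : List Char := (cs.drop i).take 2

-- pairPred cs n p m: index m holds a full pair equal to p (what A's dict records);
-- pairHit cs n j: A's pair-match condition fires at loop index j;
-- mirrorHit cs n i: A's mirror condition fires at loop index i.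
def pairPred (cs : List Char) (n : Nat) (p : List Char) (m : Nat) : Bool :=
  decide (m + 1 < n) && (pairAt cs m == p)

def pairHit (cs : List Char) (n : Nat) (j : Nat) : Bool :=
  decide (j + 1 < n) &&
    (match (List.range j).find? (pairPred cs n (pairAt cs j)) with
     | some m => decide (m + 1 < j)
     | none => false)

def mirrorHit (cs : List Char) (n : Nat) (i : Nat) : Bool :=
  decide (i + 2 < n) &&
    (PySem.List.pyGetD cs (i : Int) ' ' == PySem.List.pyGetD cs ((i : Int) + 2) ' ')

lemma slice_pairAt (cs : List Char) (i : Nat) :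
    PySem.List.slice cs (some (i : Int)) (some ((i : Int) + 2)) = pairAt cs i := by
  have : ((i : Int) + 2) = ((i + 2 : Nat) : Int) := by push_cast; ring
  rw [this, PySem.List.slice_natCast, pairAt]
  congr 1
  omega

-- find? over a range returns exactly the least index satisfying p
lemma find?_range_eq_some_iff (p : Nat → Bool) (k m : Nat) :
    (List.range k).find? p = some m ↔ m < k ∧ p m = true ∧ ∀ j < m, p j = false := by
  induction k generalizing m with
  | zero => simp
  | succ k ih =>
    rw [List.range_succ, List.find?_append]
    cases hf : (List.range k).find? p with
    | some m' =>
      simp only [Option.some_or]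
      rw [ih m'] at hf
      constructor
      · rintro ⟨rfl⟩
        exact ⟨by omega, hf.2.1, hf.2.2⟩
      · rintro ⟨hm, hpm, hmin⟩
        obtain ⟨hm', hpm', hmin'⟩ := hf
        congr
        rcases Nat.lt_trichotomy m m' with h | h | h
        · exact absurd hpm (by simp [hmin' m h])
        · omega
        · exact absurd hpm' (by simp [hmin m' h])
    | none =>
      simp only [Option.none_or]
      have hall : ∀ j < k, p j = false := by
        intro j hj
        have := List.find?_eq_none.mp hf j (List.mem_range.mpr hj)
        simpa using this
      constructor
      · intro h
        simp only [List.find?_singleton] at h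
        split at h
        · cases h; exact ⟨by omega, by assumption, hall⟩
        · cases h
      · rintro ⟨hm, hpm, hmin⟩
        have hmk : m = k := by
          rcases Nat.lt_trichotomy m k with h | h | h
          · exact absurd hpm (by simp [hall m h])
          · exact h
          · omega
        subst hmk
        simp [hpm]

-- the invariant of A's loop: the two flags are any-scans of the hit predicates and
-- the dict maps each pair to the first index where it occurs (as an Int)
lemma aLoop_inv (cs : List Char) (n : Nat) (k : Nat) :
    ((List.range k).foldl (aStep cs n) (false, PySem.Dict.empty, false)).1
        = (List.range k).any (mirrorHit cs n) ∧
    ((List.range k).foldl (aStep cs n) (false, PySem.Dict.empty, false)).2.2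
        = (List.range k).any (pairHit cs n) ∧
    ∀ p, (((List.range k).foldl (aStep cs n) (false, PySem.Dict.empty, false)).2.1).get? p
        = ((List.range k).find? (pairPred cs n p)).map (fun m => (m : Int)) := by
  induction k with
  | zero => simp [PySem.Dict.get?_empty]
  | succ k ih =>
    obtain ⟨h1, h2, h3⟩ := ih
    rw [List.range_succ]
    simp only [List.foldl_append, List.foldl_cons, List.foldl_nil,
      List.any_append, List.any_cons, List.any_nil, List.find?_append, List.find?_singleton,
      Bool.or_false]
    set st := (List.range k).foldl (aStep cs n) (false, PySem.Dict.empty, false) with hst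
    refine ⟨?_, ?_, ?_⟩
    · -- mirror flag
      simp only [aStep, h1]
      by_cases hk2 : k + 2 < n
      · simp only [if_pos hk2, mirrorHit]
        cases hb : (PySem.List.pyGetD cs (k : Int) ' ' == PySem.List.pyGetD cs ((k : Int) + 2) ' ') <;>
          simp [hk2]
      · simp [mirrorHit, hk2]
    · -- pair flag
      simp only [aStep, h2]
      by_cases hk1 : k + 1 < n
      · simp only [if_pos hk1, slice_pairAt]
        cases hf : (List.range k).find? (pairPred cs n (pairAt cs k)) with
        | none =>
          have hget : st.2.1.get? (pairAt cs k) = none := by rw [h3, hf]; rfl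
          simp [hget, pairHit, hf]
        | some m =>
          have hget : st.2.1.get? (pairAt cs k) = some ((m : Int)) := by rw [h3, hf]; rfl
          simp only [hget]
          by_cases hm : m + 1 < k
          · have hmi : ((m : Int) + 1 < (k : Int)) := by exact_mod_cast hm
            simp [hmi, pairHit, hf, hm, hk1]
          · have hmi : ¬((m : Int) + 1 < (k : Int)) := by exact_mod_cast hm
            simp [hmi, pairHit, hf, hm]
      · simp [hk1, pairHit]
    · -- dict
      intro p
      simp only [aStep]
      by_cases hk1 : k + 1 < n
      · simp only [if_pos hk1, slice_pairAt]
        cases hf : (List.range k).find? (pairPred cs n (pairAt cs k)) with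
        | some m =>
          have hget : st.2.1.get? (pairAt cs k) = some ((m : Int)) := by rw [h3, hf]; rfl
          by_cases hp : p = pairAt cs k
          · subst hp
            simp [hget, hf, Option.some_or]
          · have hpk : pairPred cs n p k = false := by
              simp only [pairPred, Bool.and_eq_false_iff]
              right
              rw [beq_eq_false_iff_ne]
              exact fun h => hp h.symm
            simp [hget, h3, hpk, Option.or_none]
        | none =>
          have hget : st.2.1.get? (pairAt cs k) = none := by rw [h3, hf]; rfl
          by_cases hp : p = pairAt cs k
          · subst hp
            have hpk : pairPred cs n (pairAt cs k) k = true := by simp [pairPred, hk1]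
            rw [if_pos (by rw [hget]; rfl), PySem.Dict.get?_insert_self]
            simp [hf, hpk]
          · have hpk : pairPred cs n p k = false := by
              simp only [pairPred, Bool.and_eq_false_iff]
              right
              rw [beq_eq_false_iff_ne]
              exact fun h => hp h.symm
            simp only [hget, Option.isNone_none, if_pos]
            rw [PySem.Dict.get?_insert_of_ne _ _ hp, h3]
            simp [hpk, Option.or_none]
      · have hpk : pairPred cs n p k = false := by simp [pairPred, hk1]
        simp [hk1, h3, hpk, Option.or_none]

-- A's pair flag over the whole string equals B's substring scan
lemma pair_sides (cs : List Char) (n : Nat) (hn : n = cs.length) :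
    (List.range n).any (pairHit cs n)
      = (List.range (n - 1)).any (fun i =>
          PySem.Chars.isIn (PySem.List.slice cs (some (i : Int)) (some ((i : Int) + 2)))
            (PySem.List.slice cs (some ((i : Int) + 2)) none)) := by
  rw [Bool.eq_iff_iff]
  simp only [List.any_eq_true, List.mem_range]
  constructor
  · rintro ⟨j, hj, h⟩
    simp only [pairHit, Bool.and_eq_true, decide_eq_true_eq] at h
    obtain ⟨hjn, h2⟩ := h
    cases hf : (List.range j).find? (pairPred cs n (pairAt cs j)) with
    | none => rw [hf] at h2; simp at h2
    | some m =>
      rw [hf] at h2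
      simp only [decide_eq_true_eq] at h2
      rw [find?_range_eq_some_iff] at hf
      obtain ⟨hmj, hpm, -⟩ := hf
      simp only [pairPred, Bool.and_eq_true, decide_eq_true_eq, beq_iff_eq] at hpm
      refine ⟨m, by omega, ?_⟩
      rw [slice_pairAt]
      have hc : ((m : Int) + 2) = ((m + 2 : Nat) : Int) := by push_cast; ring
      rw [hc, PySem.List.slice_from cs (by positivity), Int.toNat_natCast]
      rw [← PySem.Chars.exists_prefix_drop_iff_isIn]
      refine ⟨j - (m + 2), ?_⟩
      rw [List.drop_drop, hpm.2]
      have : m + 2 + (j - (m + 2)) = j := by omega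
      rw [this]
      exact List.take_prefix 2 (cs.drop j)
  · rintro ⟨i, hi, h⟩
    rw [slice_pairAt] at h
    have hc : ((i : Int) + 2) = ((i + 2 : Nat) : Int) := by push_cast; ring
    rw [hc, PySem.List.slice_from cs (by positivity), Int.toNat_natCast] at h
    rw [← PySem.Chars.exists_prefix_drop_iff_isIn] at h
    obtain ⟨j', hpre⟩ := h
    rw [List.drop_drop] at hpre
    have hlen2 : (pairAt cs i).length = 2 := by
      simp only [pairAt, List.length_take, List.length_drop]
      omega
    have hj2 : i + 2 + j' + 2 ≤ n := by
      have := hpre.length_le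
      rw [hlen2, List.length_drop] at this
      omega
    have heq : pairAt cs i = pairAt cs (i + 2 + j') := by
      have := List.prefix_iff_eq_take.mp hpre
      rw [hlen2] at this
      rw [pairAt]
      exact this
    refine ⟨i + 2 + j', by omega, ?_⟩
    simp only [pairHit, Bool.and_eq_true, decide_eq_true_eq]
    refine ⟨by omega, ?_⟩
    have hpi : pairPred cs n (pairAt cs (i + 2 + j')) i = true := by
      simp only [pairPred, Bool.and_eq_true, decide_eq_true_eq, beq_iff_eq]
      exact ⟨by omega, heq⟩
    cases hf : (List.range (i + 2 + j')).find? (pairPred cs n (pairAt cs (i + 2 + j'))) with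
    | none =>
      exfalso
      have := List.find?_eq_none.mp hf i (List.mem_range.mpr (by omega))
      simp [hpi] at this
    | some m =>
      rw [find?_range_eq_some_iff] at hf
      obtain ⟨hmj, hpm, hmin⟩ := hf
      have hmi : m ≤ i := by
        by_contra hlt
        have := hmin i (by omega)
        simp [hpi] at this
      simp only [decide_eq_true_eq]
      omega

-- A's mirror flag over the whole string equals B's direct scan
lemma mirror_sides (cs : List Char) (n : Nat) :
    (List.range n).any (mirrorHit cs n)
      = (List.range (n - 2)).any (fun i =>
          PySem.List.pyGetD cs (i : Int) ' ' == PySem.List.pyGetD cs ((i : Int) + 2) ' ') := by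
  rw [Bool.eq_iff_iff]
  simp only [List.any_eq_true, List.mem_range, mirrorHit, Bool.and_eq_true, decide_eq_true_eq]
  constructor
  · rintro ⟨i, hi, h2, h⟩
    exact ⟨i, by omega, h⟩
  · rintro ⟨i, hi, h⟩
    exact ⟨i, by omega, by omega, h⟩

-- ===== VERDICT (by name: the statement is the Claim_ definition above) =====
theorem is_good_str_p2_spec : Claim_equal_is_good_str_p2 := by
  intro input _
  unfold Spec_is_good_str_p2 is_good_str_p2 is_good_str_p2_alt
  obtain ⟨h1, h2, -⟩ := aLoop_inv input.toList input.toList.length input.toList.length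
  simp only [h1, h2, pair_sides input.toList input.toList.length rfl,
    mirror_sides input.toList input.toList.length]
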